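-- pv_equiv track=rewrite | github.com/chldppwls12/StudyTocoteAllsolve | BOJ/1339_단어_수학/chldppwls12.py | func
-- ===== SOURCE A (Python) =====
-- def func(word_list):
--   word_dict = {}
--
--   for word in word_list:
--     for i, w in enumerate(word):
--       if w in word_dict.keys():
--         word_dict[w] += 10 ** (len(word) - (i+1))
--       else:
--         word_dict[w] = 10 ** (len(word) - (i+1))
--
--   sort_list = sorted(word_dict.values(), reverse=True)
--
--   num = 9
--   ans = 0
--
--   for i in sort_list:
--     ans += i * num
--     num -= 1
--
--   return ans
-- ===== SOURCE B (Python) =====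
-- def func(word_list):
--     # per-letter weight of each letter across all words
--     weight = {}
--     for word in word_list:
--         n = len(word)
--         for i, ch in enumerate(word):
--             weight[ch] = weight.get(ch, 0) + 10 ** (n - i - 1)
--     # greedy digit assignment: heaviest letter gets 9, then 8, 7, ... (no clamping)
--     digit = 9
--     value = {}
--     for ch in sorted(weight, key=lambda c: weight[c], reverse=True):
--         value[ch] = digit
--         digit -= 1
--     # re-evaluate the original equation under the assignment
--     total = 0
--     for word in word_list:
--         n = len(word)
--         for i, ch in enumerate(word):
--             total += value[ch] * 10 ** (n - i - 1)
--     return total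
-- ===== Notes on version B (the rewrite author's own statement) =====
-- stated objective: idiomatic
-- what changed: Instead of multiplying the sorted weight values by a descending counter, B assigns each letter a digit (9,8,7,... over letters sorted by weight, without clamping, so 11th+ letters go negative like A) and then re-evaluates the original word equation under that letter->digit mapping in a second pass over the words.
import Mathlib
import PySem

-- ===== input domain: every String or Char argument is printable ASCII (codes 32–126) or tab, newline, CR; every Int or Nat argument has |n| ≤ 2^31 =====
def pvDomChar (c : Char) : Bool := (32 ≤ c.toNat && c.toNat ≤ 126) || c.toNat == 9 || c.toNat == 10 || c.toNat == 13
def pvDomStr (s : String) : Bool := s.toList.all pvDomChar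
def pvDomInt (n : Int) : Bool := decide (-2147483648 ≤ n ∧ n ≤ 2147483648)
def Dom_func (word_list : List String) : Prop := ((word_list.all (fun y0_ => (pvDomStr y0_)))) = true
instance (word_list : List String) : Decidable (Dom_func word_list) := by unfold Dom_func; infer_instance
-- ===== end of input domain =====

-- B assigns digits 9,8,7,... to the letters sorted by weight and re-evaluates the word equation
-- under that assignment (idiomatic decomposition); same value as A on every input.

-- ===== PORT A =====
def func (word_list : List String) : Int :=
  let word_dict : PySem.Dict Char Int := word_list.foldl (fun d word =>
    (PySem.List.enumerate word.toList 0).foldl (fun d p =>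
      if d.contains p.2 then
        d.insert p.2 (d.getD p.2 0 + (10:Int) ^ (word.toList.length - (p.1 + 1).toNat))
      else
        d.insert p.2 ((10:Int) ^ (word.toList.length - (p.1 + 1).toNat))) d) PySem.Dict.empty
  let sort_list := PySem.List.sorted word_dict.values (fun v => v) true
  (sort_list.foldl (fun (s : Int × Int) i => (s.1 + i * s.2, s.2 - 1)) ((0 : Int), (9 : Int))).1

-- ===== PORT B =====
def func_alt (word_list : List String) : Int :=
  let weight : PySem.Dict Char Int := word_list.foldl (fun d word =>
    (PySem.List.enumerate word.toList 0).foldl (fun d p =>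
      d.insert p.2 (d.getD p.2 0 + (10:Int) ^ (word.toList.length - (p.1 + 1).toNat))) d) PySem.Dict.empty
  -- value[ch] = digit over letters sorted by weight descending (Python dict lookups weight[c] /
  -- value[ch] always hit, every such char is a key, so getD _ 0 is exact)
  let value : PySem.Dict Char Int :=
    ((PySem.List.sorted weight.keys (fun c => weight.getD c 0) true).foldl
      (fun (s : PySem.Dict Char Int × Int) c => (s.1.insert c s.2, s.2 - 1))
      (PySem.Dict.empty, (9 : Int))).1
  word_list.foldl (fun t word =>
    (PySem.List.enumerate word.toList 0).foldl (fun t p =>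
      t + value.getD p.2 0 * (10:Int) ^ (word.toList.length - (p.1 + 1).toNat)) t) 0

-- ===== PRECONDITION & SPEC =====
def Spec_func (word_list : List String) (out : Int) : Prop := out = func_alt word_list
instance (word_list : List String) (out : Int) : Decidable (Spec_func word_list out) := by unfold Spec_func; infer_instance

-- ===== CLAIM (what is proved, stated in full; the proofs are below) =====
def Claim_equal_func : Prop := ∀ (word_list : List String), Dom_func word_list → Spec_func word_list (func word_list)

-- ===== LEMMAS AND PROOFS =====

-- (char, positional power) pairs of one word
def pvPows (word : String) : List (Char × Int) :=
  (PySem.List.enumerate word.toList 0).map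
    (fun p => (p.2, (10:Int) ^ (word.toList.length - (p.1 + 1).toNat)))

def pvStep (d : PySem.Dict Char Int) (q : Char × Int) : PySem.Dict Char Int :=
  d.insert q.1 (d.getD q.1 0 + q.2)

def pvL (ws : List String) : List (Char × Int) := ws.flatMap pvPows

def pvW (ws : List String) : PySem.Dict Char Int := (pvL ws).foldl pvStep PySem.Dict.empty

def descSum : List Int → Int → Int
  | [], _ => 0
  | v :: t, n => v * n + descSum t (n - 1)

def pvSf (f : Char → Int) (d : PySem.Dict Char Int) : Int :=
  (d.items.map (fun p => f p.1 * p.2)).sum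

theorem pv_foldl_flatMap {α β γ : Type} (g : β → List γ) (f : α → γ → α) :
    ∀ (l : List β) (a : α),
      (l.flatMap g).foldl f a = l.foldl (fun a b => (g b).foldl f a) a := by
  intro l
  induction l with
  | nil => intro a; rfl
  | cons b t ih => intro a; simp [List.flatMap_cons, List.foldl_append, ih]

theorem pv_descSum_fold :
    ∀ (vs : List Int) (a n : Int),
      (vs.foldl (fun (s : Int × Int) i => (s.1 + i * s.2, s.2 - 1)) (a, n)).1
        = a + descSum vs n := by
  intro vs
  induction vs with
  | nil => intro a n; simp [descSum]
  | cons v t ih => intro a n; simp [descSum, ih]; ring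

theorem pv_inner_B (word : String) (d : PySem.Dict Char Int) :
    (PySem.List.enumerate word.toList 0).foldl (fun d p =>
        d.insert p.2 (d.getD p.2 0 + (10:Int) ^ (word.toList.length - (p.1 + 1).toNat))) d
      = (pvPows word).foldl pvStep d := by
  unfold pvPows
  rw [List.foldl_map]
  rfl

theorem pv_inner_A (word : String) (d : PySem.Dict Char Int) :
    (PySem.List.enumerate word.toList 0).foldl (fun d p =>
        if d.contains p.2 then
          d.insert p.2 (d.getD p.2 0 + (10:Int) ^ (word.toList.length - (p.1 + 1).toNat))
        else
          d.insert p.2 ((10:Int) ^ (word.toList.length - (p.1 + 1).toNat))) d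
      = (pvPows word).foldl pvStep d := by
  rw [← pv_inner_B]
  have hstep : (fun (d : PySem.Dict Char Int) (p : Int × Char) =>
      if d.contains p.2 then
        d.insert p.2 (d.getD p.2 0 + (10:Int) ^ (word.toList.length - (p.1 + 1).toNat))
      else
        d.insert p.2 ((10:Int) ^ (word.toList.length - (p.1 + 1).toNat)))
      = (fun (d : PySem.Dict Char Int) (p : Int × Char) =>
        d.insert p.2 (d.getD p.2 0 + (10:Int) ^ (word.toList.length - (p.1 + 1).toNat))) := by
    funext d p
    by_cases h : d.contains p.2
    · simp [h]
    · rw [if_neg h, PySem.Dict.getD_of_not_contains d 0 (by simpa using h), zero_add]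
  rw [hstep]

theorem pv_buildA_eq_W (ws : List String) :
    ws.foldl (fun d word =>
      (PySem.List.enumerate word.toList 0).foldl (fun d p =>
        if d.contains p.2 then
          d.insert p.2 (d.getD p.2 0 + (10:Int) ^ (word.toList.length - (p.1 + 1).toNat))
        else
          d.insert p.2 ((10:Int) ^ (word.toList.length - (p.1 + 1).toNat))) d)
      PySem.Dict.empty = pvW ws := by
  unfold pvW pvL
  rw [pv_foldl_flatMap]
  have : (fun (d : PySem.Dict Char Int) (word : String) =>
      (PySem.List.enumerate word.toList 0).foldl (fun d p =>
        if d.contains p.2 then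
          d.insert p.2 (d.getD p.2 0 + (10:Int) ^ (word.toList.length - (p.1 + 1).toNat))
        else
          d.insert p.2 ((10:Int) ^ (word.toList.length - (p.1 + 1).toNat))) d)
      = (fun (d : PySem.Dict Char Int) (word : String) => (pvPows word).foldl pvStep d) := by
    funext d w; exact pv_inner_A w d
  rw [this]

theorem pv_buildB_eq_W (ws : List String) :
    ws.foldl (fun d word =>
      (PySem.List.enumerate word.toList 0).foldl (fun d p =>
        d.insert p.2 (d.getD p.2 0 + (10:Int) ^ (word.toList.length - (p.1 + 1).toNat))) d)
      PySem.Dict.empty = pvW ws := by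
  unfold pvW pvL
  rw [pv_foldl_flatMap]
  have : (fun (d : PySem.Dict Char Int) (word : String) =>
      (PySem.List.enumerate word.toList 0).foldl (fun d p =>
        d.insert p.2 (d.getD p.2 0 + (10:Int) ^ (word.toList.length - (p.1 + 1).toNat))) d)
      = (fun (d : PySem.Dict Char Int) (word : String) => (pvPows word).foldl pvStep d) := by
    funext d w; exact pv_inner_B w d
  rw [this]

theorem pv_W_keys_nodup (ws : List String) : (pvW ws).keys.Nodup := by
  unfold pvW
  rw [show pvStep = (fun (d : PySem.Dict Char Int) (q : Char × Int) =>
      d.insert q.1 (d.getD q.1 0 + q.2)) from rfl]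
  exact PySem.Dict.nodup_keys_foldl_insert_key (pvL ws) Prod.fst _ _ PySem.Dict.nodup_keys_empty

theorem pv_sum_replace (f : Char → Int) (c : Char) (v x : Int) :
    ∀ (l : List (Char × Int)), (l.map Prod.fst).Nodup → (c, v) ∈ l →
      ((l.map (fun p => if p.1 == c then (c, v + x) else p)).map (fun p => f p.1 * p.2)).sum
        = (l.map (fun p => f p.1 * p.2)).sum + f c * x := by
  intro l
  induction l with
  | nil => intro _ h; cases h
  | cons p t ih =>
    intro hn hmem
    simp only [List.map_cons, List.nodup_cons] at hn
    obtain ⟨hp, ht⟩ := hn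
    rw [List.mem_cons] at hmem
    rcases hmem with hmem | hmem
    · have hpc : p = (c, v) := hmem.symm
      subst hpc
      have htail : t.map (fun q => if q.1 == c then (c, v + x) else q) = t := by
        rw [List.map_congr_left (g := id) ?_, List.map_id]
        intro q hq
        have : q.1 ≠ c := by
          intro hqc
          have hq1 : q.1 ∈ t.map Prod.fst := List.mem_map_of_mem (f := Prod.fst) hq
          exact hp (hqc ▸ hq1)
        simp [this]
      simp only [List.map_cons, List.sum_cons, beq_self_eq_true, if_true, htail]
      ring
    · have hpc : p.1 ≠ c := by
        intro hpc
        apply hp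
        have : c ∈ t.map Prod.fst := by
          simpa using List.mem_map_of_mem (f := Prod.fst) hmem
        rwa [hpc]
      simp only [List.map_cons, List.sum_cons]
      rw [if_neg (by simp [hpc]), ih ht hmem]
      ring

theorem pv_Sf_insert (f : Char → Int) (d : PySem.Dict Char Int) (hnd : d.keys.Nodup)
    (c : Char) (x : Int) :
    pvSf f (d.insert c (d.getD c 0 + x)) = pvSf f d + f c * x := by
  by_cases h : d.contains c
  · cases hg : d.get? c with
    | none =>
      rw [(PySem.Dict.get?_eq_none_iff_contains d c).mp hg] at h
      cases h
    | some v =>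
      have hv : d.getD c 0 = v := PySem.Dict.getD_of_get?_eq_some d 0 hg
      have hm : (c, v) ∈ d.items := PySem.Dict.mem_items_of_get?_eq_some d hg
      unfold pvSf
      rw [PySem.Dict.items_insert_of_contains d _ h, hv]
      exact pv_sum_replace f c v x d.items hnd hm
  · unfold pvSf
    rw [PySem.Dict.items_insert_of_not_contains d _ (by simpa using h),
        PySem.Dict.getD_of_not_contains d 0 (by simpa using h)]
    simp [List.sum_append]

theorem pv_Sf_foldl (f : Char → Int) :
    ∀ (L : List (Char × Int)) (d : PySem.Dict Char Int), d.keys.Nodup →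
      pvSf f (L.foldl pvStep d) = pvSf f d + (L.map (fun q => f q.1 * q.2)).sum := by
  intro L
  induction L with
  | nil => intro d _; simp
  | cons q t ih =>
    intro d hnd
    have hnd' : (pvStep d q).keys.Nodup := by
      unfold pvStep
      exact PySem.Dict.nodup_keys_insert d q.1 _ hnd
    rw [List.foldl_cons, ih (pvStep d q) hnd']
    unfold pvStep
    rw [pv_Sf_insert f d hnd q.1 q.2]
    simp [add_assoc]

theorem pv_valueFold_getD_of_not_mem (c : Char) :
    ∀ (ks : List Char) (s : PySem.Dict Char Int × Int), c ∉ ks →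
      ((ks.foldl (fun (s : PySem.Dict Char Int × Int) k => (s.1.insert k s.2, s.2 - 1)) s).1).getD c 0
        = s.1.getD c 0 := by
  intro ks
  induction ks with
  | nil => intro s _; rfl
  | cons k t ih =>
    intro s hc
    rw [List.mem_cons, not_or] at hc
    rw [List.foldl_cons, ih _ hc.2]
    exact PySem.Dict.getD_insert_of_ne s.1 s.2 0 hc.1

theorem pv_valueSum (g : Char → Int) :
    ∀ (ks : List Char), ks.Nodup → ∀ (d0 : PySem.Dict Char Int) (n : Int),
      (ks.map (fun k =>
          ((ks.foldl (fun (s : PySem.Dict Char Int × Int) k => (s.1.insert k s.2, s.2 - 1)) (d0, n)).1).getD k 0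
            * g k)).sum
        = descSum (ks.map g) n := by
  intro ks
  induction ks with
  | nil => intro _ d0 n; simp [descSum]
  | cons c t ih =>
    intro hk d0 n
    rw [List.nodup_cons] at hk
    simp only [List.map_cons, List.sum_cons, List.foldl_cons, descSum]
    rw [pv_valueFold_getD_of_not_mem c t _ hk.1, PySem.Dict.getD_insert_self,
        ih hk.2 (d0.insert c n) (n - 1)]
    ring

theorem pv_sum_flatMap {β : Type} (h : Char × Int → Int) :
    ∀ (ws : List β) (g : β → List (Char × Int)),
      (ws.map (fun w => ((g w).map h).sum)).sum = ((ws.flatMap g).map h).sum := by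
  intro ws
  induction ws with
  | nil => intro g; rfl
  | cons w t ih => intro g; simp [List.flatMap_cons, ih g]

theorem pv_sorted_values (d : PySem.Dict Char Int) (hnd : d.keys.Nodup) :
    (PySem.List.sorted d.keys (fun c => d.getD c 0) true).map (fun k => d.getD k 0)
      = PySem.List.sorted d.values (fun v => v) true := by
  apply List.Perm.eq_of_pairwise (le := fun a b : Int => b ≤ a)
  · exact fun a b _ _ h1 h2 => le_antisymm h2 h1
  · exact List.Pairwise.map _ (fun a b hab => hab)
      (PySem.List.sorted_pairwise_rev d.keys (fun c => d.getD c 0))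
  · exact PySem.List.sorted_pairwise_rev d.values (fun v => v)
  · have h1 : ((PySem.List.sorted d.keys (fun c => d.getD c 0) true).map (fun k => d.getD k 0)).Perm
        (d.keys.map (fun k => d.getD k 0)) :=
      (PySem.List.sorted_perm d.keys (fun c => d.getD c 0) true).map _
    have h2 : d.keys.map (fun k => d.getD k 0) = d.values :=
      (PySem.Dict.values_eq_map_keys d hnd 0).symm
    rw [h2] at h1
    exact h1.trans (PySem.List.sorted_perm d.values (fun v => v) true).symm

-- ===== VERDICT (by name: the statement is the Claim_ definition above) =====
theorem pv_B_eq (ws : List String) (vd : PySem.Dict Char Int) :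
    ws.foldl (fun t word => (PySem.List.enumerate word.toList 0).foldl
        (fun t p => t + vd.getD p.2 0 * (10:Int) ^ (word.toList.length - (p.1 + 1).toNat)) t) 0
      = pvSf (fun c => vd.getD c 0) (pvW ws) := by
  have hmap : ∀ word : String,
      (pvPows word).map (fun q => vd.getD q.1 0 * q.2)
        = (PySem.List.enumerate word.toList 0).map
            (fun p => vd.getD p.2 0 * (10:Int) ^ (word.toList.length - (p.1 + 1).toNat)) := by
    intro w
    unfold pvPows
    rw [List.map_map]
    rfl
  simp only [PySem.List.foldl_add, zero_add]
  simp only [← hmap]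
  rw [pv_sum_flatMap]
  have hB := pv_Sf_foldl (fun c => vd.getD c 0) (pvL ws) PySem.Dict.empty
    PySem.Dict.nodup_keys_empty
  have h0 : pvSf (fun c => vd.getD c 0) (PySem.Dict.empty : PySem.Dict Char Int) = 0 := rfl
  rw [h0, zero_add] at hB
  exact hB.symm

theorem pv_Sf_eq_descSum (d : PySem.Dict Char Int) (hnd : d.keys.Nodup) :
    pvSf (fun c => ((PySem.List.sorted d.keys (fun c => d.getD c 0) true).foldl
        (fun (s : PySem.Dict Char Int × Int) c => (s.1.insert c s.2, s.2 - 1))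
        (PySem.Dict.empty, (9:Int))).1.getD c 0) d
      = descSum (PySem.List.sorted d.values (fun v => v) true) 9 := by
  have hperm : (PySem.List.sorted d.keys (fun c => d.getD c 0) true).Perm d.keys :=
    PySem.List.sorted_perm d.keys (fun c => d.getD c 0) true
  have hnd2 : (PySem.List.sorted d.keys (fun c => d.getD c 0) true).Nodup :=
    (hperm.nodup_iff).mpr hnd
  unfold pvSf
  rw [PySem.Dict.items_eq_map_keys d hnd 0, List.map_map]
  simp only [Function.comp_def]
  rw [← (hperm.map (fun k =>
      ((PySem.List.sorted d.keys (fun c => d.getD c 0) true).foldl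
        (fun (s : PySem.Dict Char Int × Int) c => (s.1.insert c s.2, s.2 - 1))
        (PySem.Dict.empty, (9:Int))).1.getD k 0 * d.getD k 0)).sum_eq]
  rw [pv_valueSum (fun k => d.getD k 0) _ hnd2 PySem.Dict.empty 9]
  rw [pv_sorted_values d hnd]

theorem func_spec : Claim_equal_func := by
  unfold Claim_equal_func Spec_func
  intro ws _
  have hnd := pv_W_keys_nodup ws
  simp only [func, func_alt, pv_buildA_eq_W, pv_buildB_eq_W]
  rw [pv_descSum_fold, zero_add, pv_B_eq, pv_Sf_eq_descSum _ hnd]
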